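-- pv_equiv track=rewrite | github.com/JudyHsiao/codejam | jam/centrists.py | create_alphabet_order
-- ===== SOURCE A (Python) =====
-- import collections
--
-- def create_alphabet_order(words):
--     G= collections.defaultdict(dict)
--     prefixSet= collections.defaultdict(list)
--     V=set()
--     for w in words:
--         for i in range(len(w)+1):
--             if i < len(w):
--                 V.add(w[i])
--             k = w[:i]
--             v = w[i:]
--             if v!="":
--                 prefixSet[k].append(v)
--
--     for k in prefixSet:
--         l = prefixSet[k]
--         for i in range(len(l)):
--             for j in range(i+1, len(l)):
--                 u = l[i][0]
--                 v = l[j][0]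
--                 G[u][v] = 1
--     return G,V
-- ===== SOURCE B (Python) =====
-- def create_alphabet_order(words):
--     # Group by proper prefix, recording only the character after the prefix;
--     # then, per group, one backward pass precomputes the deduplicated suffix
--     # (distinct later chars in first-occurrence order) for every position, and
--     # a forward pass writes each row directly from that list -- no pairwise
--     # i<j loop over suffix strings.
--     groups = {}
--     V = set()
--     for w in words:
--         for i in range(len(w)):
--             V.add(w[i])
--             groups.setdefault(w[:i], []).append(w[i])
--     rows = {}
--     for c in groups.values():
--         suffs = []
--         D = []  # distinct chars of the not-yet-scanned suffix, first-occurrence order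
--         for u in reversed(c):
--             suffs.append(D)
--             D = [u] + [x for x in D if x != u]
--         suffs.reverse()
--         for u, s in zip(c, suffs):
--             if s:
--                 row = rows.setdefault(u, {})
--                 for v in s:
--                     row[v] = 1
--     return rows, V
-- ===== Notes on version B (the rewrite author's own statement) =====
-- stated objective: faster
-- what changed: B replaces A's per-group all-pairs i<j loop over suffix strings by a single backward pass that precomputes, for every position, the deduplicated list of later characters (first-occurrence order), and a forward pass that writes each row directly from that list.
import Mathlib
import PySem

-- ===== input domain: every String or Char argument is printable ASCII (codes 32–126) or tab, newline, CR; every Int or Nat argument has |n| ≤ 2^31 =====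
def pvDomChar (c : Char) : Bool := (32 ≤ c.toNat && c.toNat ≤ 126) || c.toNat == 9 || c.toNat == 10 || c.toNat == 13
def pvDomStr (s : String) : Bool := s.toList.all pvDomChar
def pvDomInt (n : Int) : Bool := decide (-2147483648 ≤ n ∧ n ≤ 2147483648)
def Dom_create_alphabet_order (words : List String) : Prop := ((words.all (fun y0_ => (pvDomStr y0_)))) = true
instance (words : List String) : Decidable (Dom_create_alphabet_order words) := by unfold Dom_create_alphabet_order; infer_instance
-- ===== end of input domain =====

-- B precomputes, per group, the deduplicated list of later chars for every position in one
-- backward pass and writes each row directly from it, replacing A's pairwise i<j suffix loop.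


-- ===== PORT A =====
-- w[i] as a 1-char Python string; none = IndexError, unreachable at every call site
-- (each caller guards 0 ≤ i < len of the string).
def pvChr (w : String) (i : Int) : String :=
  match PySem.Str.pyGet? w i with
  | some c => String.ofList [c]
  | none => ""

-- s[0] (used for l[i][0] / l[j][0]; the suffixes stored in prefixSet are nonempty).
def pvHead (s : String) : String := pvChr s 0

def create_alphabet_order (words : List String) : (List (String × List (String × Int))) × List String :=
  -- G = defaultdict(dict); prefixSet = defaultdict(list); V = set()
  -- first loop: for w in words: for i in range(len(w)+1): …
  let st := words.foldl (fun (st : PySem.Dict String (List String) × PySem.Set String) w =>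
      (PySem.List.pyRange 0 (PySem.Str.len w + 1)).foldl (fun st i =>
        let st := if i < PySem.Str.len w then (st.1, PySem.Set.add st.2 (pvChr w i)) else st
        let k := PySem.Str.slice w none (some i)
        let v := PySem.Str.slice w (some i) none
        if v ≠ "" then (st.1.modify k [] (fun l => l ++ [v]), st.2) else st) st)
    (PySem.Dict.empty, PySem.Set.empty)
  -- second loop: for k in prefixSet: l = prefixSet[k]; for i …: for j in range(i+1, len(l)): G[u][v] = 1
  let G := st.1.keys.foldl (fun (G : PySem.Dict String (PySem.Dict String Int)) k =>
      let l := st.1.getD k []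
      (PySem.List.pyRange 0 (l.length : Int)).foldl (fun G i =>
        (PySem.List.pyRange (i + 1) (l.length : Int)).foldl (fun G j =>
          let u := pvHead (PySem.List.pyGetD l i "")
          let v := pvHead (PySem.List.pyGetD l j "")
          G.modify u PySem.Dict.empty (fun d => d.insert v 1)) G) G)
    PySem.Dict.empty
  (G.items.map (fun p => (p.1, p.2.items)), st.2)

-- ===== PORT B =====
def create_alphabet_order_alt (words : List String) : (List (String × List (String × Int))) × List String :=
  -- groups = {}; V = set(); for w in words: for i in range(len(w)): V.add(w[i]); groups.setdefault(w[:i], []).append(w[i])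
  let st := words.foldl (fun (st : PySem.Dict String (List String) × PySem.Set String) w =>
      (PySem.List.pyRange 0 (PySem.Str.len w)).foldl (fun st i =>
        let c := pvChr w i
        (st.1.modify (PySem.Str.slice w none (some i)) [] (fun l => l ++ [c]),
         PySem.Set.add st.2 c)) st)
    (PySem.Dict.empty, PySem.Set.empty)
  -- for c in groups.values():
  --   suffs = []; D = []
  --   for u in reversed(c): suffs.append(D); D = [u] + [x for x in D if x != u]
  --   suffs.reverse()
  --   for u, s in zip(c, suffs):
  --     if s: row = rows.setdefault(u, {}); for v in s: row[v] = 1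
  -- (setdefault followed by in-place item assignments is ported as Dict.modify; exact since s ≠ [])
  let G := st.1.values.foldl (fun (rows : PySem.Dict String (PySem.Dict String Int)) c =>
      let sp := c.reverse.foldl (fun (q : List (List String) × List String) u =>
          (q.1 ++ [q.2], u :: q.2.filter (fun x => x ≠ u))) ([], [])
      let suffs := sp.1.reverse
      (c.zip suffs).foldl (fun rows us =>
        if us.2 ≠ [] then
          rows.modify us.1 PySem.Dict.empty (fun row => us.2.foldl (fun row v => row.insert v 1) row)
        else rows) rows)
    PySem.Dict.empty
  (G.items.map (fun p => (p.1, p.2.items)), st.2)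

-- ===== PRECONDITION & SPEC =====
def Spec_create_alphabet_order (words : List String) (out : (List (String × List (String × Int))) × List String) : Prop := out = create_alphabet_order_alt words
instance (words : List String) (out : (List (String × List (String × Int))) × List String) : Decidable (Spec_create_alphabet_order words out) := by unfold Spec_create_alphabet_order; infer_instance

-- ===== CLAIM (what is proved, stated in full; the proofs are below) =====
def Claim_equal_create_alphabet_order : Prop := ∀ (words : List String), Dom_create_alphabet_order words → Spec_create_alphabet_order words (create_alphabet_order words)

-- ===== LEMMAS AND PROOFS =====

-- abbreviations for the graph dictionary
abbrev pvGD := PySem.Dict String (PySem.Dict String Int)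

-- G[u][v] = 1 on a defaultdict(dict)
def pvIns (G : pvGD) (u v : String) : pvGD :=
  G.modify u PySem.Dict.empty (fun d => d.insert v 1)

def pvInsAll (G : pvGD) (u : String) (t : List String) : pvGD :=
  t.foldl (fun G v => pvIns G u v) G

-- structural form of A's double loop over a group's list of leading chars
def pvDl : pvGD → List String → pvGD
  | G, [] => G
  | G, u :: t => pvDl (pvInsAll G u t) t

-- insert every element of l with value 1
def pvIL (d : PySem.Dict String Int) (l : List String) : PySem.Dict String Int :=
  l.foldl (fun d v => d.insert v 1) d

-- Python-order dedup: first occurrences, in order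
def pvDed : List String → List String
  | [] => []
  | a :: t => a :: (pvDed t).filter (fun x => x ≠ a)

-- per-position deduplicated suffix lists
def pvSuffs : List String → List (List String)
  | [] => []
  | _ :: t => pvDed t :: pvSuffs t

-- structural form of B's row-writing loop
def pvBl : pvGD → List String → pvGD
  | G, [] => G
  | G, u :: t =>
    pvBl (if pvDed t ≠ [] then G.modify u PySem.Dict.empty (fun d => pvIL d (pvDed t)) else G) t

-- well-formedness: nodup keys at both dict levels
def pvWF (G : pvGD) : Prop :=
  G.keys.Nodup ∧ ∀ p ∈ G.items, (Prod.snd p).keys.Nodup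

-- prefix dict with every stored suffix replaced by its first char
def pvMapD (d : PySem.Dict String (List String)) : PySem.Dict String (List String) :=
  PySem.Dict.mk (d.items.map (fun p => (p.1, p.2.map pvHead)))


lemma pv_replace_eq {ν : Type} (l : List (String × ν)) (k : String) (v : ν)
    (hnd : (l.map Prod.fst).Nodup)
    (h : (l.find? (fun p => p.1 == k)).map Prod.snd = some v) :
    l.map (fun p => if p.1 == k then (k, v) else p) = l := by
  induction l with
  | nil => simp at h
  | cons p t ih =>
    obtain ⟨p1, p2⟩ := p
    simp only [List.map_cons, List.nodup_cons] at hnd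
    by_cases hp : p1 = k
    · rw [List.find?_cons_of_pos (by simp [hp])] at h
      simp only [Option.map_some, Option.some.injEq] at h
      have hmem : ∀ q ∈ (p1, p2) :: t, (fun r : String × ν => if r.1 == k then (k, v) else r) q = id q := by
        intro q hq
        rcases List.mem_cons.mp hq with rfl | hq'
        · simp [hp, h]
        · have hq1 : q.1 ≠ k := by
            intro hk
            exact hnd.1 (by rw [hp, ← hk]; exact List.mem_map_of_mem hq')
          simp [hq1]
      rw [List.map_congr_left hmem, List.map_id]
    · rw [List.find?_cons_of_neg (by simp [hp])] at h
      rw [List.map_cons, if_neg (by simp [hp]), ih hnd.2 h]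

lemma pv_nodup_keys_insert {ν : Type} (d : PySem.Dict String ν) (k : String) (v : ν)
    (hnd : d.keys.Nodup) : (d.insert k v).keys.Nodup := by
  by_cases hc : d.contains k = true
  · have : (d.insert k v).keys = d.keys := by
      simp only [PySem.Dict.keys, PySem.Dict.items_insert, if_pos hc, List.map_map]
      apply List.map_congr_left
      intro p _
      by_cases h : p.1 = k <;> simp [Function.comp, h]
    rw [this]; exact hnd
  · have hk : k ∉ d.keys := by
      rw [PySem.Dict.contains_eq_decide_mem_keys] at hc
      simpa using hc
    have : (d.insert k v).keys = d.keys ++ [k] := by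
      simp [PySem.Dict.keys, PySem.Dict.items_insert, hc]
    rw [this]
    simp [List.nodup_append, hnd]
    intro a ha hak
    exact hk (hak ▸ ha)

lemma pv_insert_get?_eq {ν : Type} (d : PySem.Dict String ν) (k : String) (v : ν)
    (hnd : d.keys.Nodup) (h : d.get? k = some v) : d.insert k v = d := by
  have hc : d.contains k = true := by
    rw [PySem.Dict.contains_eq_isSome_get?, h]; rfl
  apply PySem.Dict.ext
  rw [PySem.Dict.items_insert, if_pos hc]
  exact pv_replace_eq _ _ _ hnd (by simpa [PySem.Dict.get?] using h)

-- ===== basic facts about pvIns / pvInsAll =====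

lemma pv_getD_eq_get? (G : pvGD) (u : String) :
    G.getD u PySem.Dict.empty = (G.get? u).getD PySem.Dict.empty := rfl

-- ===== well-formedness =====

lemma pv_wf_inner (G : pvGD) (u : String) (h : pvWF G) :
    (G.getD u PySem.Dict.empty).keys.Nodup := by
  rw [pv_getD_eq_get?]
  cases hg : G.get? u with
  | none => simp [PySem.Dict.empty, PySem.Dict.keys]
  | some d => exact h.2 (u, d) (PySem.Dict.mem_items_of_get?_eq_some _ hg)

lemma pv_wf_ins (G : pvGD) (u v : String) (h : pvWF G) : pvWF (pvIns G u v) := by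
  constructor
  · exact pv_nodup_keys_insert _ _ _ h.1
  · intro p hp
    rw [pvIns, PySem.Dict.modify] at hp
    rcases (PySem.Dict.mem_items_insert _ _ _ _).mp hp with rfl | ⟨hp', _⟩
    · exact pv_nodup_keys_insert _ _ _ (pv_wf_inner G u h)
    · exact h.2 p hp'

lemma pv_wf_insAll (t : List String) (G : pvGD) (u : String) (h : pvWF G) :
    pvWF (pvInsAll G u t) := by
  induction t generalizing G with
  | nil => exact h
  | cons a t ih => rw [pvInsAll, List.foldl_cons, ← pvInsAll]; exact ih _ (pv_wf_ins _ _ _ h)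

lemma pv_wf_dl (c : List String) (G : pvGD) (h : pvWF G) : pvWF (pvDl G c) := by
  induction c generalizing G with
  | nil => exact h
  | cons u t ih => exact ih _ (pv_wf_insAll _ _ _ h)

-- ===== dedup insertion is the same dict as raw insertion =====

lemma pvIL_cons (d : PySem.Dict String Int) (v : String) (l : List String) :
    pvIL d (v :: l) = pvIL (d.insert v 1) l := by
  rw [pvIL, List.foldl_cons]; rfl

lemma pv_IL_skip (l : List String) (d : PySem.Dict String Int) (a : String)
    (h1 : d.get? a = some 1) (hnd : d.keys.Nodup) :
    pvIL d l = pvIL d (l.filter (fun x => x ≠ a)) := by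
  induction l generalizing d with
  | nil => rfl
  | cons b t ih =>
    by_cases hb : b = a
    · rw [pvIL_cons, hb, pv_insert_get?_eq d a 1 hnd h1,
          List.filter_cons_of_neg (by simp), ih d h1 hnd]
    · rw [pvIL_cons, List.filter_cons_of_pos (by simp [hb]), pvIL_cons]
      exact ih _ (by rw [PySem.Dict.get?_insert_of_ne _ _ (Ne.symm hb), h1])
        (pv_nodup_keys_insert _ _ _ hnd)

lemma pv_ded_filter (l : List String) (a : String) :
    pvDed (l.filter (fun x => x ≠ a)) = (pvDed l).filter (fun x => x ≠ a) := by
  induction l with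
  | nil => rfl
  | cons b t ih =>
    by_cases hb : b = a
    · subst hb
      rw [List.filter_cons_of_neg (by simp), ih, pvDed, List.filter_cons_of_neg (by simp),
          List.filter_filter]
      apply List.filter_congr
      intro x _
      simp
    · rw [List.filter_cons_of_pos (by simp [hb]), pvDed, pvDed, ih,
          List.filter_cons_of_pos (by simp [hb]), List.filter_filter, List.filter_filter]
      congr 1
      apply List.filter_congr
      intro x _
      exact Bool.and_comm _ _

lemma pv_IL_ded (n : Nat) : ∀ (l : List String), l.length ≤ n →
    ∀ (d : PySem.Dict String Int), d.keys.Nodup → pvIL d l = pvIL d (pvDed l) := by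
  induction n with
  | zero =>
    intro l hl d _
    have h0 : l = [] := List.length_eq_zero_iff.mp (by omega)
    subst h0
    rfl
  | succ n ih =>
    intro l hl d hnd
    cases l with
    | nil => rfl
    | cons a t =>
      rw [pvDed, pvIL_cons, pvIL_cons]
      have hnd' := pv_nodup_keys_insert d a 1 hnd
      have h1 : (d.insert a 1).get? a = some 1 := PySem.Dict.get?_insert_self d a 1
      have hlt : t.length ≤ n := by simp at hl; omega
      rw [pv_IL_skip t _ a h1 hnd',
          ih _ (le_trans (List.length_filter_le _ _) hlt) _ hnd',
          pv_ded_filter]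

-- ===== pvInsAll as a single modify =====

lemma pv_modify_modify (G : pvGD) (u : String) (f g : PySem.Dict String Int → PySem.Dict String Int) :
    (G.modify u PySem.Dict.empty f).modify u PySem.Dict.empty g
      = G.modify u PySem.Dict.empty (fun d => g (f d)) := by
  simp [PySem.Dict.modify, PySem.Dict.getD_insert_self, PySem.Dict.insert_insert_self]

lemma pv_insAll_modify (t : List String) :
    ∀ (G : pvGD) (u : String) (f : PySem.Dict String Int → PySem.Dict String Int),
    pvInsAll (G.modify u PySem.Dict.empty f) u t
      = G.modify u PySem.Dict.empty (fun d => pvIL (f d) t) := by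
  induction t with
  | nil => intro G u f; rfl
  | cons v t ih =>
    intro G u f
    rw [pvInsAll, List.foldl_cons, ← pvInsAll,
        show pvIns (G.modify u PySem.Dict.empty f) u v
          = (G.modify u PySem.Dict.empty f).modify u PySem.Dict.empty (fun d => d.insert v 1) from rfl,
        pv_modify_modify, ih]
    simp [pvIL]

lemma pv_insAll_eq_modify (G : pvGD) (u v : String) (t : List String) :
    pvInsAll G u (v :: t) = G.modify u PySem.Dict.empty (fun d => pvIL d (v :: t)) := by
  rw [pvInsAll, List.foldl_cons, ← pvInsAll,
      show pvIns G u v = G.modify u PySem.Dict.empty (fun d => d.insert v 1) from rfl,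
      pv_insAll_modify]
  simp [pvIL]

-- ===== B's step equals A's inner insertion pass =====

lemma pv_step (G : pvGD) (u : String) (t : List String) (hwf : pvWF G) :
    (if pvDed t ≠ [] then G.modify u PySem.Dict.empty (fun d => pvIL d (pvDed t)) else G)
      = pvInsAll G u t := by
  cases t with
  | nil => simp [pvDed, pvInsAll]
  | cons v t' =>
    rw [if_pos (by simp [pvDed]), pv_insAll_eq_modify]
    simp only [PySem.Dict.modify]
    rw [← pv_IL_ded (v :: t').length (v :: t') le_rfl _ (pv_wf_inner G u hwf)]

lemma pv_BD (c : List String) : ∀ (G : pvGD), pvWF G → pvBl G c = pvDl G c := by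
  induction c with
  | nil => intro G _; rfl
  | cons u t ih =>
    intro G hwf
    rw [pvBl, pvDl, pv_step G u t hwf]
    exact ih _ (pv_wf_insAll _ _ _ hwf)

-- ===== the backward pass computes pvSuffs / pvDed =====

lemma pv_foldr_susp (c : List String) :
    c.foldr (fun u (q : List (List String) × List String) =>
        (q.1 ++ [q.2], u :: q.2.filter (fun x => x ≠ u))) ([], [])
      = ((pvSuffs c).reverse, pvDed c) := by
  induction c with
  | nil => rfl
  | cons u t ih =>
    rw [List.foldr_cons, ih, pvSuffs, pvDed, List.reverse_cons]

lemma pv_zipfold (c : List String) : ∀ (G : pvGD),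
    (c.zip (pvSuffs c)).foldl (fun rows us =>
        if us.2 ≠ [] then
          rows.modify us.1 PySem.Dict.empty (fun row => us.2.foldl (fun row v => row.insert v 1) row)
        else rows) G
      = pvBl G c := by
  induction c with
  | nil => intro G; rfl
  | cons u t ih =>
    intro G
    rw [pvSuffs, List.zip_cons_cons, List.foldl_cons, pvBl, ← ih]
    rfl

-- B's whole per-group body, reduced to pvBl
lemma pv_group (c : List String) (G : pvGD) :
    (let sp := c.reverse.foldl (fun (q : List (List String) × List String) u =>
          (q.1 ++ [q.2], u :: q.2.filter (fun x => x ≠ u))) ([], [])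
     let suffs := sp.1.reverse
     (c.zip suffs).foldl (fun rows us =>
        if us.2 ≠ [] then
          rows.modify us.1 PySem.Dict.empty (fun row => us.2.foldl (fun row v => row.insert v 1) row)
        else rows) G)
      = pvBl G c := by
  simp only [List.foldl_reverse]
  rw [pv_foldr_susp c, List.reverse_reverse]
  exact pv_zipfold c G

-- ===== pvMapD: the prefix dict of suffixes vs B's dict of leading chars =====

lemma pvMapD_keys (d : PySem.Dict String (List String)) : (pvMapD d).keys = d.keys := by
  simp [pvMapD, PySem.Dict.keys, List.map_map, Function.comp]

lemma pvMapD_contains (d : PySem.Dict String (List String)) (k : String) :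
    (pvMapD d).contains k = d.contains k := by
  simp [pvMapD, PySem.Dict.contains, List.any_map, Function.comp_def]

lemma pvMapD_get? (d : PySem.Dict String (List String)) (k : String) :
    (pvMapD d).get? k = (d.get? k).map (List.map pvHead) := by
  simp [pvMapD, PySem.Dict.get?, List.find?_map, Function.comp_def, Option.map_map]

lemma pvMapD_getD (d : PySem.Dict String (List String)) (k : String) :
    (pvMapD d).getD k [] = (d.getD k []).map pvHead := by
  rw [PySem.Dict.getD, PySem.Dict.getD, pvMapD_get?]
  cases d.get? k <;> simp

lemma pvMapD_insert (d : PySem.Dict String (List String)) (k : String) (x : List String) :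
    pvMapD (d.insert k x) = (pvMapD d).insert k (x.map pvHead) := by
  have hitems : ∀ e : PySem.Dict String (List String),
      (pvMapD e).items = e.items.map (fun p => (p.1, p.2.map pvHead)) := fun _ => rfl
  apply PySem.Dict.ext
  by_cases hc : d.contains k = true
  · have hc' : (pvMapD d).contains k = true := by rw [pvMapD_contains]; exact hc
    rw [hitems, PySem.Dict.items_insert, PySem.Dict.items_insert, if_pos hc, if_pos hc',
        hitems, List.map_map, List.map_map]
    apply List.map_congr_left
    intro p _
    by_cases h : p.1 = k <;> simp [h]
  · have hc' : ¬ (pvMapD d).contains k = true := by rw [pvMapD_contains]; exact hc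
    rw [hitems, PySem.Dict.items_insert, PySem.Dict.items_insert, if_neg hc, if_neg hc',
        hitems, List.map_append]
    rfl

lemma pvMapD_modify (d : PySem.Dict String (List String)) (k v : String) :
    pvMapD (d.modify k [] (fun l => l ++ [v]))
      = (pvMapD d).modify k [] (fun l => l ++ [pvHead v]) := by
  rw [PySem.Dict.modify, PySem.Dict.modify, pvMapD_insert, pvMapD_getD, List.map_append]
  rfl

-- ===== stage 1: the first loops build related states =====

lemma pvHead_slice_chr (w : String) (i : Int) (h : 0 ≤ i) :
    pvHead (PySem.Str.slice w (some i) none) = pvChr w i := by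
  unfold pvHead pvChr
  have h1 : (PySem.Str.slice w (some i) none).toList = w.toList.drop i.toNat := by
    rw [PySem.Str.toList_slice, PySem.Chars.slice_eq_listSlice, PySem.List.slice_from _ h]
  have h2 : PySem.Str.pyGet? (PySem.Str.slice w (some i) none) 0
      = w.toList[i.toNat]? := by
    rw [show (0 : Int) = ((0 : Nat) : Int) from rfl, PySem.Str.pyGet?_natCast, h1]
    simp
  have h3 : PySem.Str.pyGet? w i = w.toList[i.toNat]? := by
    conv_lhs => rw [show i = ((i.toNat : Nat) : Int) from (Int.toNat_of_nonneg h).symm]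
    rw [PySem.Str.pyGet?_natCast]
  rw [h2, h3]

lemma pv_wordA (w : String) (p : PySem.Dict String (List String)) (V : PySem.Set String) :
    (PySem.List.pyRange 0 (PySem.Str.len w + 1)).foldl (fun st i =>
        let st := if i < PySem.Str.len w then (st.1, PySem.Set.add st.2 (pvChr w i)) else st
        let k := PySem.Str.slice w none (some i)
        let v := PySem.Str.slice w (some i) none
        if v ≠ "" then (st.1.modify k [] (fun l => l ++ [v]), st.2) else st) (p, V)
    = ((PySem.List.pyRange 0 (PySem.Str.len w)).foldl (fun d i =>
          d.modify (PySem.Str.slice w none (some i)) [] (fun l => l ++ [PySem.Str.slice w (some i) none])) p,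
       (PySem.List.pyRange 0 (PySem.Str.len w)).foldl (fun V i => PySem.Set.add V (pvChr w i)) V) := by
  have hn0 : (0 : Int) ≤ PySem.Str.len w := by rw [PySem.Str.len_eq]; positivity
  rw [PySem.List.pyRange_one_succ_right hn0, List.foldl_append, List.foldl_cons, List.foldl_nil]
  have hv : PySem.Str.slice w (some ((w.length : Nat) : Int)) none = "" := by
    apply String.toList_inj.mp
    rw [PySem.Str.toList_slice, PySem.Chars.slice_eq_listSlice,
        PySem.List.slice_from _ (by positivity)]
    simp
  have hlast : ∀ st : PySem.Dict String (List String) × PySem.Set String,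
      (let st' := if PySem.Str.len w < PySem.Str.len w then (st.1, PySem.Set.add st.2 (pvChr w (PySem.Str.len w))) else st
       let k := PySem.Str.slice w none (some (PySem.Str.len w))
       let v := PySem.Str.slice w (some (PySem.Str.len w)) none
       if v ≠ "" then (st'.1.modify k [] (fun l => l ++ [v]), st'.2) else st') = st := by
    intro st
    simp [PySem.Str.len_eq, hv]
  rw [hlast]
  have hcong : ∀ (st : PySem.Dict String (List String) × PySem.Set String),
      ∀ i ∈ PySem.List.pyRange 0 (PySem.Str.len w),
      (let st' := if i < PySem.Str.len w then (st.1, PySem.Set.add st.2 (pvChr w i)) else st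
       let k := PySem.Str.slice w none (some i)
       let v := PySem.Str.slice w (some i) none
       if v ≠ "" then (st'.1.modify k [] (fun l => l ++ [v]), st'.2) else st')
      = ((st.1.modify (PySem.Str.slice w none (some i)) [] (fun l => l ++ [PySem.Str.slice w (some i) none]),
          PySem.Set.add st.2 (pvChr w i))) := by
    intro st i hi
    obtain ⟨h0, h1⟩ := PySem.List.mem_pyRange_one.mp hi
    have hvne : PySem.Str.slice w (some i) none ≠ "" := by
      intro h
      have h' := congrArg String.toList h
      rw [PySem.Str.toList_slice, PySem.Chars.slice_eq_listSlice, PySem.List.slice_from _ h0,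
          show ("" : String).toList = [] from rfl, List.drop_eq_nil_iff] at h'
      rw [PySem.Str.len_eq] at h1
      omega
    have h1' : i < ((w.length : Nat) : Int) := by
      rw [PySem.Str.len_eq] at h1; simpa using h1
    simp [h1', hvne]
  rw [PySem.List.foldl_congr_mem _ _ _ _ hcong]
  exact PySem.List.foldl_prod_mk
    (fun d i => d.modify (PySem.Str.slice w none (some i)) [] (fun l => l ++ [PySem.Str.slice w (some i) none]))
    (fun V i => PySem.Set.add V (pvChr w i)) _ p V


lemma pv_wordB (w : String) (p : PySem.Dict String (List String)) (V : PySem.Set String) :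
    (PySem.List.pyRange 0 (PySem.Str.len w)).foldl (fun st i =>
        let c := pvChr w i
        (st.1.modify (PySem.Str.slice w none (some i)) [] (fun l => l ++ [c]),
         PySem.Set.add st.2 c)) (p, V)
    = ((PySem.List.pyRange 0 (PySem.Str.len w)).foldl (fun d i =>
          d.modify (PySem.Str.slice w none (some i)) [] (fun l => l ++ [pvChr w i])) p,
       (PySem.List.pyRange 0 (PySem.Str.len w)).foldl (fun V i => PySem.Set.add V (pvChr w i)) V) :=
  PySem.List.foldl_prod_mk
    (fun d i => d.modify (PySem.Str.slice w none (some i)) [] (fun l => l ++ [pvChr w i]))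
    (fun V i => PySem.Set.add V (pvChr w i)) _ p V

lemma pv_commute_gen (w : String) :
    ∀ (idx : List Int) (d : PySem.Dict String (List String)), (∀ i ∈ idx, 0 ≤ i) →
    idx.foldl (fun d i =>
        d.modify (PySem.Str.slice w none (some i)) [] (fun l => l ++ [pvChr w i])) (pvMapD d)
    = pvMapD (idx.foldl (fun d i =>
        d.modify (PySem.Str.slice w none (some i)) [] (fun l => l ++ [PySem.Str.slice w (some i) none])) d) := by
  intro idx
  induction idx with
  | nil => intro d _; rfl
  | cons i t ih =>
    intro d h
    rw [List.foldl_cons, List.foldl_cons,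
        show (pvMapD d).modify (PySem.Str.slice w none (some i)) [] (fun l => l ++ [pvChr w i])
          = pvMapD (d.modify (PySem.Str.slice w none (some i)) [] (fun l => l ++ [PySem.Str.slice w (some i) none])) from by
        rw [pvMapD_modify, pvHead_slice_chr w i (h i List.mem_cons_self)]]
    exact ih _ (fun j hj => h j (List.mem_cons_of_mem _ hj))

lemma pv_fold1 : ∀ (words : List String) (p : PySem.Dict String (List String)) (V : PySem.Set String),
    p.keys.Nodup →
    (words.foldl (fun st w =>
      (PySem.List.pyRange 0 (PySem.Str.len w)).foldl (fun st i =>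
        let c := pvChr w i
        (st.1.modify (PySem.Str.slice w none (some i)) [] (fun l => l ++ [c]),
         PySem.Set.add st.2 c)) st) (pvMapD p, V))
    = (pvMapD (words.foldl (fun st w =>
        (PySem.List.pyRange 0 (PySem.Str.len w + 1)).foldl (fun st i =>
          let st := if i < PySem.Str.len w then (st.1, PySem.Set.add st.2 (pvChr w i)) else st
          let k := PySem.Str.slice w none (some i)
          let v := PySem.Str.slice w (some i) none
          if v ≠ "" then (st.1.modify k [] (fun l => l ++ [v]), st.2) else st) st) (p, V)).1,
       (words.foldl (fun st w =>
        (PySem.List.pyRange 0 (PySem.Str.len w + 1)).foldl (fun st i =>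
          let st := if i < PySem.Str.len w then (st.1, PySem.Set.add st.2 (pvChr w i)) else st
          let k := PySem.Str.slice w none (some i)
          let v := PySem.Str.slice w (some i) none
          if v ≠ "" then (st.1.modify k [] (fun l => l ++ [v]), st.2) else st) st) (p, V)).2)
    ∧ (words.foldl (fun st w =>
        (PySem.List.pyRange 0 (PySem.Str.len w + 1)).foldl (fun st i =>
          let st := if i < PySem.Str.len w then (st.1, PySem.Set.add st.2 (pvChr w i)) else st
          let k := PySem.Str.slice w none (some i)
          let v := PySem.Str.slice w (some i) none
          if v ≠ "" then (st.1.modify k [] (fun l => l ++ [v]), st.2) else st) st) (p, V)).1.keys.Nodup := by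
  intro words
  induction words with
  | nil => intro p V h; exact ⟨rfl, h⟩
  | cons w ws ih =>
    intro p V h
    simp only [List.foldl_cons]
    rw [pv_wordA w p V, pv_wordB w (pvMapD p) V,
        pv_commute_gen w (PySem.List.pyRange 0 (PySem.Str.len w)) p
          (fun i hi => (PySem.List.mem_pyRange_one.mp hi).1)]
    exact ih _ _ (PySem.Dict.nodup_keys_foldl_modify_key _
      (fun i => PySem.Str.slice w none (some i)) []
      (fun _ i => fun l => l ++ [PySem.Str.slice w (some i) none]) p h)

lemma pv_wf_empty : pvWF PySem.Dict.empty := by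
  constructor
  · simp [PySem.Dict.keys, PySem.Dict.empty]
  · intro q hq
    simp [PySem.Dict.empty] at hq

-- A's index double loop over one group, reduced to pvDl
lemma pv_genA (l : List String) :
    ∀ (n k : Nat) (G : pvGD), l.length - k = n →
      (PySem.List.pyRange (k : Int) (l.length : Int)).foldl (fun G i =>
        (PySem.List.pyRange (i + 1) (l.length : Int)).foldl (fun G j =>
          pvIns G (pvHead (PySem.List.pyGetD l i "")) (pvHead (PySem.List.pyGetD l j ""))) G) G
      = pvDl G ((l.drop k).map pvHead) := by
  intro n
  induction n with
  | zero =>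
    intro k G hk
    have hk' : l.length ≤ k := by omega
    rw [PySem.List.pyRange_one_eq_nil (by exact_mod_cast hk'), List.drop_eq_nil_of_le hk']
    rfl
  | succ n ihn =>
    intro k G hk
    have hlt : k < l.length := by omega
    rw [PySem.List.pyRange_one_cons (by exact_mod_cast hlt), List.foldl_cons]
    have hcast : ((k : Int) + 1) = ((k + 1 : Nat) : Int) := by push_cast; ring
    have h1 : (PySem.List.pyRange ((k : Int) + 1) (l.length : Int)).foldl (fun G j =>
          pvIns G (pvHead (PySem.List.pyGetD l (k : Int) "")) (pvHead (PySem.List.pyGetD l j ""))) G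
        = pvInsAll G (pvHead (PySem.List.pyGetD l (k : Int) "")) ((l.drop (k + 1)).map pvHead) := by
      rw [PySem.List.foldl_pyRange_pyGetD' l ""
            (fun G s => pvIns G (pvHead (PySem.List.pyGetD l (k : Int) "")) (pvHead s)) G
            (by omega : (0 : Int) ≤ (k : Int) + 1)]
      have ht : ((k : Int) + 1).toNat = k + 1 := by omega
      rw [pvInsAll, List.foldl_map, ht]
    rw [h1, List.drop_eq_getElem_cons hlt, List.map_cons, pvDl]
    rw [show l[k] = l.getD k "" from (List.getD_eq_getElem l "" hlt).symm]
    have h2 : pvHead (PySem.List.pyGetD l (k : Int) "") = pvHead (l.getD k "") := by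
      rw [PySem.List.pyGetD_natCast]
    rw [h2, hcast]
    exact ihn (k + 1) _ (by omega)

-- ===== stage 2: B's group loop equals A's double loop =====

lemma pv_stage2 (p : PySem.Dict String (List String)) (hnd : p.keys.Nodup) :
    (pvMapD p).values.foldl (fun (rows : PySem.Dict String (PySem.Dict String Int)) c =>
      let sp := c.reverse.foldl (fun (q : List (List String) × List String) u =>
          (q.1 ++ [q.2], u :: q.2.filter (fun x => x ≠ u))) ([], [])
      let suffs := sp.1.reverse
      (c.zip suffs).foldl (fun rows us =>
        if us.2 ≠ [] then
          rows.modify us.1 PySem.Dict.empty (fun row => us.2.foldl (fun row v => row.insert v 1) row)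
        else rows) rows) PySem.Dict.empty
    = p.keys.foldl (fun (G : PySem.Dict String (PySem.Dict String Int)) k =>
        let l := p.getD k []
        (PySem.List.pyRange 0 (l.length : Int)).foldl (fun G i =>
          (PySem.List.pyRange (i + 1) (l.length : Int)).foldl (fun G j =>
            let u := pvHead (PySem.List.pyGetD l i "")
            let v := pvHead (PySem.List.pyGetD l j "")
            G.modify u PySem.Dict.empty (fun d => d.insert v 1)) G) G) PySem.Dict.empty := by
  have hndm : (pvMapD p).keys.Nodup := by rw [pvMapD_keys]; exact hnd
  rw [PySem.Dict.values_eq_map_keys (pvMapD p) hndm [], pvMapD_keys,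
      List.map_congr_left (fun k _ => pvMapD_getD p k), List.foldl_map]
  have main : ∀ (ks : List String) (G : PySem.Dict String (PySem.Dict String Int)), pvWF G →
      ks.foldl (fun G k =>
        let c := (p.getD k []).map pvHead
        let sp := c.reverse.foldl (fun (q : List (List String) × List String) u =>
            (q.1 ++ [q.2], u :: q.2.filter (fun x => x ≠ u))) ([], [])
        let suffs := sp.1.reverse
        (c.zip suffs).foldl (fun rows us =>
          if us.2 ≠ [] then
            rows.modify us.1 PySem.Dict.empty (fun row => us.2.foldl (fun row v => row.insert v 1) row)
          else rows) G) G
      = ks.foldl (fun G k =>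
          let l := p.getD k []
          (PySem.List.pyRange 0 (l.length : Int)).foldl (fun G i =>
            (PySem.List.pyRange (i + 1) (l.length : Int)).foldl (fun G j =>
              let u := pvHead (PySem.List.pyGetD l i "")
              let v := pvHead (PySem.List.pyGetD l j "")
              G.modify u PySem.Dict.empty (fun d => d.insert v 1)) G) G) G := by
    intro ks
    induction ks with
    | nil => intro G _; rfl
    | cons k t ih =>
      intro G hwf
      simp only [List.foldl_cons]
      have hB : (let c := (p.getD k []).map pvHead
          let sp := c.reverse.foldl (fun (q : List (List String) × List String) u =>
              (q.1 ++ [q.2], u :: q.2.filter (fun x => x ≠ u))) ([], [])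
          let suffs := sp.1.reverse
          (c.zip suffs).foldl (fun rows us =>
            if us.2 ≠ [] then
              rows.modify us.1 PySem.Dict.empty (fun row => us.2.foldl (fun row v => row.insert v 1) row)
            else rows) G)
          = pvDl G ((p.getD k []).map pvHead) := by
        rw [pv_group ((p.getD k []).map pvHead) G]
        exact pv_BD _ G hwf
      have hA : (let l := p.getD k []
          (PySem.List.pyRange 0 (l.length : Int)).foldl (fun G i =>
            (PySem.List.pyRange (i + 1) (l.length : Int)).foldl (fun G j =>
              let u := pvHead (PySem.List.pyGetD l i "")
              let v := pvHead (PySem.List.pyGetD l j "")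
              G.modify u PySem.Dict.empty (fun d => d.insert v 1)) G) G)
          = pvDl G ((p.getD k []).map pvHead) := by
        have hg := pv_genA (p.getD k []) (p.getD k []).length 0 G (by omega)
        rw [List.drop_zero] at hg
        exact hg
      rw [hB, hA]
      exact ih _ (pv_wf_dl _ _ hwf)
  exact main p.keys PySem.Dict.empty pv_wf_empty

set_option maxHeartbeats 2000000 in
lemma pv_main (words : List String) :
    create_alphabet_order words = create_alphabet_order_alt words := by
  obtain ⟨h1, hnd⟩ := pv_fold1 words PySem.Dict.empty PySem.Set.empty
    (by simp [PySem.Dict.keys, PySem.Dict.empty])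
  rw [show pvMapD PySem.Dict.empty = PySem.Dict.empty from rfl] at h1
  have hG : ((words.foldl (fun st w =>
      (PySem.List.pyRange 0 (PySem.Str.len w)).foldl (fun st i =>
        let c := pvChr w i
        (st.1.modify (PySem.Str.slice w none (some i)) [] (fun l => l ++ [c]),
         PySem.Set.add st.2 c)) st)
    (PySem.Dict.empty, PySem.Set.empty)).1).values.foldl (fun (rows : PySem.Dict String (PySem.Dict String Int)) c =>
      let sp := c.reverse.foldl (fun (q : List (List String) × List String) u =>
          (q.1 ++ [q.2], u :: q.2.filter (fun x => x ≠ u))) ([], [])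
      let suffs := sp.1.reverse
      (c.zip suffs).foldl (fun rows us =>
        if us.2 ≠ [] then
          rows.modify us.1 PySem.Dict.empty (fun row => us.2.foldl (fun row v => row.insert v 1) row)
        else rows) rows)
    PySem.Dict.empty = ((words.foldl (fun st w =>
      (PySem.List.pyRange 0 (PySem.Str.len w + 1)).foldl (fun st i =>
        let st := if i < PySem.Str.len w then (st.1, PySem.Set.add st.2 (pvChr w i)) else st
        let k := PySem.Str.slice w none (some i)
        let v := PySem.Str.slice w (some i) none
        if v ≠ "" then (st.1.modify k [] (fun l => l ++ [v]), st.2) else st) st)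
    (PySem.Dict.empty, PySem.Set.empty)).1).keys.foldl (fun (G : PySem.Dict String (PySem.Dict String Int)) k =>
      let l := ((words.foldl (fun st w =>
      (PySem.List.pyRange 0 (PySem.Str.len w + 1)).foldl (fun st i =>
        let st := if i < PySem.Str.len w then (st.1, PySem.Set.add st.2 (pvChr w i)) else st
        let k := PySem.Str.slice w none (some i)
        let v := PySem.Str.slice w (some i) none
        if v ≠ "" then (st.1.modify k [] (fun l => l ++ [v]), st.2) else st) st)
    (PySem.Dict.empty, PySem.Set.empty)).1).getD k []
      (PySem.List.pyRange 0 (l.length : Int)).foldl (fun G i =>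
        (PySem.List.pyRange (i + 1) (l.length : Int)).foldl (fun G j =>
          let u := pvHead (PySem.List.pyGetD l i "")
          let v := pvHead (PySem.List.pyGetD l j "")
          G.modify u PySem.Dict.empty (fun d => d.insert v 1)) G) G)
    PySem.Dict.empty := by
    rw [h1]
    exact pv_stage2 _ hnd
  have hV : (words.foldl (fun st w =>
      (PySem.List.pyRange 0 (PySem.Str.len w)).foldl (fun st i =>
        let c := pvChr w i
        (st.1.modify (PySem.Str.slice w none (some i)) [] (fun l => l ++ [c]),
         PySem.Set.add st.2 c)) st)
    (PySem.Dict.empty, PySem.Set.empty)).2 = (words.foldl (fun st w =>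
      (PySem.List.pyRange 0 (PySem.Str.len w + 1)).foldl (fun st i =>
        let st := if i < PySem.Str.len w then (st.1, PySem.Set.add st.2 (pvChr w i)) else st
        let k := PySem.Str.slice w none (some i)
        let v := PySem.Str.slice w (some i) none
        if v ≠ "" then (st.1.modify k [] (fun l => l ++ [v]), st.2) else st) st)
    (PySem.Dict.empty, PySem.Set.empty)).2 := by rw [h1]
  show ((((words.foldl (fun st w =>
      (PySem.List.pyRange 0 (PySem.Str.len w + 1)).foldl (fun st i =>
        let st := if i < PySem.Str.len w then (st.1, PySem.Set.add st.2 (pvChr w i)) else st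
        let k := PySem.Str.slice w none (some i)
        let v := PySem.Str.slice w (some i) none
        if v ≠ "" then (st.1.modify k [] (fun l => l ++ [v]), st.2) else st) st)
    (PySem.Dict.empty, PySem.Set.empty)).1).keys.foldl (fun (G : PySem.Dict String (PySem.Dict String Int)) k =>
      let l := ((words.foldl (fun st w =>
      (PySem.List.pyRange 0 (PySem.Str.len w + 1)).foldl (fun st i =>
        let st := if i < PySem.Str.len w then (st.1, PySem.Set.add st.2 (pvChr w i)) else st
        let k := PySem.Str.slice w none (some i)
        let v := PySem.Str.slice w (some i) none
        if v ≠ "" then (st.1.modify k [] (fun l => l ++ [v]), st.2) else st) st)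
    (PySem.Dict.empty, PySem.Set.empty)).1).getD k []
      (PySem.List.pyRange 0 (l.length : Int)).foldl (fun G i =>
        (PySem.List.pyRange (i + 1) (l.length : Int)).foldl (fun G j =>
          let u := pvHead (PySem.List.pyGetD l i "")
          let v := pvHead (PySem.List.pyGetD l j "")
          G.modify u PySem.Dict.empty (fun d => d.insert v 1)) G) G)
    PySem.Dict.empty).items.map (fun p => (p.1, p.2.items)), (words.foldl (fun st w =>
      (PySem.List.pyRange 0 (PySem.Str.len w + 1)).foldl (fun st i =>
        let st := if i < PySem.Str.len w then (st.1, PySem.Set.add st.2 (pvChr w i)) else st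
        let k := PySem.Str.slice w none (some i)
        let v := PySem.Str.slice w (some i) none
        if v ≠ "" then (st.1.modify k [] (fun l => l ++ [v]), st.2) else st) st)
    (PySem.Dict.empty, PySem.Set.empty)).2)
    = ((((words.foldl (fun st w =>
      (PySem.List.pyRange 0 (PySem.Str.len w)).foldl (fun st i =>
        let c := pvChr w i
        (st.1.modify (PySem.Str.slice w none (some i)) [] (fun l => l ++ [c]),
         PySem.Set.add st.2 c)) st)
    (PySem.Dict.empty, PySem.Set.empty)).1).values.foldl (fun (rows : PySem.Dict String (PySem.Dict String Int)) c =>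
      let sp := c.reverse.foldl (fun (q : List (List String) × List String) u =>
          (q.1 ++ [q.2], u :: q.2.filter (fun x => x ≠ u))) ([], [])
      let suffs := sp.1.reverse
      (c.zip suffs).foldl (fun rows us =>
        if us.2 ≠ [] then
          rows.modify us.1 PySem.Dict.empty (fun row => us.2.foldl (fun row v => row.insert v 1) row)
        else rows) rows)
    PySem.Dict.empty).items.map (fun p => (p.1, p.2.items)), (words.foldl (fun st w =>
      (PySem.List.pyRange 0 (PySem.Str.len w)).foldl (fun st i =>
        let c := pvChr w i
        (st.1.modify (PySem.Str.slice w none (some i)) [] (fun l => l ++ [c]),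
         PySem.Set.add st.2 c)) st)
    (PySem.Dict.empty, PySem.Set.empty)).2)
  rw [hG, hV]

-- ===== VERDICT (by name: the statement is the Claim_ definition above) =====
theorem create_alphabet_order_spec : Claim_equal_create_alphabet_order := by
  intro words _
  unfold Spec_create_alphabet_order
  exact pv_main words
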